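-- pv_equiv track=rewrite | github.com/adamnoor/data-structures-code | rearrange_slow.py | rearrange_list
-- ===== SOURCE A (Python) =====
-- def rearrange_list(list):
--     i = 0 #current position
--     min_position = 0
--     min_value = list[0]
--     max_value = list[1]
--     for i in range(0, len(list)):
--         if (i%2 != 0):
--             #look for min since the current position for comparison starts in an odd index
--             for j in range(i+1, len(list)):
--                 if(list[i] < list[j]):
--                     temp = list[i]
--                     list[i] = list[j]
--                     list[j] = temp
--
--         else:
--             for j in range(i+1, len(list)):
--                 if(list[i] > list[j]):
--                     temp = list[i]
--                     list[i] = list[j]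
--                     list[j] = temp
--
--     return (list)
-- ===== SOURCE B (Python) =====
-- def rearrange_list(list):
--     # sort once, then two-pointer fill: alternately take from the front and the back
--     s = sorted(list)
--     lo, hi = 0, len(s) - 1
--     out = []
--     while lo <= hi:
--         out.append(s[lo])
--         lo += 1
--         if lo <= hi:
--             out.append(s[hi])
--             hi -= 1
--     list[:] = out
--     return list
-- ===== Notes on version B (the rewrite author's own statement) =====
-- stated objective: faster
-- what changed: A's nested swap-scan (for each index, rescan the whole tail to select the min or max in place) is replaced by sorting once and filling the result with two pointers, alternately taking from the front and the back of the sorted list.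
import Mathlib
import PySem

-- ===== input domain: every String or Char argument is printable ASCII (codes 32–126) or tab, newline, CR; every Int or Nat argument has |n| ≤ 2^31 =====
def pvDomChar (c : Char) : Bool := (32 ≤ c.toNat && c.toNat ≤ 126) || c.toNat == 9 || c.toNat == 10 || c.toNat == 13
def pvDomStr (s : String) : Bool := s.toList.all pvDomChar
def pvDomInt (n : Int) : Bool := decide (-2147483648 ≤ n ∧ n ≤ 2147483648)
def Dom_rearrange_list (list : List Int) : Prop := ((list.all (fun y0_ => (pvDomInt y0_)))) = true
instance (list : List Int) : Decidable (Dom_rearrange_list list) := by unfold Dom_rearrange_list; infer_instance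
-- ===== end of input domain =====

-- B replaces A's quadratic in-place alternating selection (swap-scan per index) by sort + two-pointer
-- fill (objective: faster); equivalence is about the RETURN value (in Python both also mutate their
-- argument, to the same final content).

-- ===== PORT A =====
-- One step of A's inner scan at position i: compare list[i] with list[j], swap if the comparison
-- fires.  b = true is the even-index branch (list[i] > list[j]), b = false the odd one
-- (list[i] < list[j]).  All indices the loops reach are in range, so pyGetD/pySetD are exact here.
def pvStep (b : Bool) (i : Int) (xs : List Int) (j : Int) : List Int :=
  if (if b then PySem.List.pyGetD xs i 0 > PySem.List.pyGetD xs j 0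
      else PySem.List.pyGetD xs i 0 < PySem.List.pyGetD xs j 0) then
    let temp := PySem.List.pyGetD xs i 0
    let xs' := PySem.List.pySetD xs i (PySem.List.pyGetD xs j 0)
    PySem.List.pySetD xs' j temp
  else xs

-- A's initial reads min_value = list[0], max_value = list[1] are dead values but RAISE IndexError
-- for len(list) < 2; those inputs are excluded by Pre_ and the dead reads are not re-done here.
def rearrange_list (list : List Int) : List Int :=
  let n : Int := list.length
  (PySem.List.pyRange 0 n 1).foldl (fun xs i =>
    if PySem.Int.mod i 2 ≠ 0 then
      (PySem.List.pyRange (i + 1) n 1).foldl (pvStep false i) xs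
    else
      (PySem.List.pyRange (i + 1) n 1).foldl (pvStep true i) xs) list

-- ===== PORT B =====
-- Source B's while loop: alternately append s[lo] (lo += 1) and s[hi] (hi -= 1) while lo <= hi.
-- The fuel argument only bounds the number of iterations ((hi+1-lo).toNat is exact), keeping the
-- recursion structural; the loop body is Source B's.
def pvFillAux (s : List Int) : Nat → Int → Int → List Int → List Int
  | 0, _, _, out => out
  | f + 1, lo, hi, out =>
    if lo ≤ hi then
      let out1 := out ++ [PySem.List.pyGetD s lo 0]
      if lo + 1 ≤ hi then
        pvFillAux s f (lo + 1) (hi - 1) (out1 ++ [PySem.List.pyGetD s hi 0])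
      else
        pvFillAux s f (lo + 1) hi out1
    else out

def pvFill (s : List Int) (lo hi : Int) (out : List Int) : List Int :=
  pvFillAux s (hi + 1 - lo).toNat lo hi out

def rearrange_list_alt (list : List Int) : List Int :=
  let s := PySem.List.sorted list (fun x => x) false
  pvFill s 0 ((s.length : Int) - 1) []

-- ===== PRECONDITION & SPEC =====
-- Pre_ excludes exactly the inputs where A raises: list[1] (IndexError) for lists of length < 2.
def Pre_rearrange_list (list : List Int) : Prop := 2 ≤ list.length
instance (list : List Int) : Decidable (Pre_rearrange_list list) := by
  unfold Pre_rearrange_list; infer_instance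
def pvWitness_rearrange_list : List Int := [1, 2]

def Spec_rearrange_list (list : List Int) (out : List Int) : Prop := out = rearrange_list_alt list
instance (list : List Int) (out : List Int) : Decidable (Spec_rearrange_list list out) := by
  unfold Spec_rearrange_list; infer_instance

-- ===== CLAIM (what is proved, stated in full; the proofs are below) =====
def Claim_equal_rearrange_list : Prop := ∀ (list : List Int), Dom_rearrange_list list →
  Pre_rearrange_list list → Spec_rearrange_list list (rearrange_list list)

-- ===== LEMMAS AND PROOFS =====

-- One whole inner scan of A, structurally: carry c along the rest, swapping whenever the
-- comparison fires.  Returns (final value at position i, final content of the scanned suffix).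
def pvPass (b : Bool) (c : Int) : List Int → Int × List Int
  | [] => (c, [])
  | y :: ys =>
    if (if b then c > y else c < y) then
      let p := pvPass b y ys
      (p.1, c :: p.2)
    else
      let p := pvPass b c ys
      (p.1, y :: p.2)

theorem pvPass_perm (b : Bool) (c : Int) (l : List Int) :
    (c :: l).Perm ((pvPass b c l).1 :: (pvPass b c l).2) := by
  induction l generalizing c with
  | nil => simp [pvPass]
  | cons y ys ih =>
    by_cases hc : (if b then c > y else c < y)
    · simp only [pvPass, if_pos hc]
      exact (List.Perm.cons c (ih y)).trans (List.Perm.swap _ _ _)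
    · simp only [pvPass, if_neg hc]
      exact (List.Perm.swap y c ys).trans ((List.Perm.cons y (ih c)).trans
        (List.Perm.swap _ _ _))

theorem pvPass_length (b : Bool) (c : Int) (l : List Int) :
    (pvPass b c l).2.length = l.length := by
  have h := (pvPass_perm b c l).length_eq
  simp only [List.length_cons] at h
  omega

-- A's whole outer loop, structurally: alternate min- and max-selection passes.
def pvZigS (b : Bool) : List Int → List Int
  | [] => []
  | x :: r =>
    (pvPass b x r).1 :: pvZigS (!b) (pvPass b x r).2
termination_by l => l.length
decreasing_by simp [pvPass_length]

-- Two-pointer spec: take the head, then the last, alternately.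
def pvZZ : Bool → List Int → List Int
  | _, [] => []
  | true, x :: r => x :: pvZZ false r
  | false, x :: r => (x :: r).getLast (by simp) :: pvZZ true (x :: r).dropLast
termination_by _ l => l.length
decreasing_by all_goals simp

theorem pvZigS_nil (b : Bool) : pvZigS b [] = [] := by simp [pvZigS]

theorem pvZigS_cons (b : Bool) (x : Int) (r : List Int) :
    pvZigS b (x :: r) = (pvPass b x r).1 :: pvZigS (!b) (pvPass b x r).2 := by
  simp only [pvZigS]

theorem pvZZ_nil (b : Bool) : pvZZ b [] = [] := by cases b <;> simp [pvZZ]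

theorem pvZZ_true_cons (x : Int) (r : List Int) :
    pvZZ true (x :: r) = x :: pvZZ false r := by simp [pvZZ]

theorem pvZZ_false_cons (x : Int) (r : List Int) :
    pvZZ false (x :: r) = (x :: r).getLast (by simp) :: pvZZ true (x :: r).dropLast := by
  simp [pvZZ]

-- small list facts used below
theorem pvTake_succ_of_lt (l : List Int) (n : Nat) (h : n < l.length) :
    l.take (n + 1) = l.take n ++ [l[n]] := by
  rw [List.take_add_one]
  simp [List.getElem?_eq_getElem h]

theorem pvTake_set_succ (l : List Int) (n : Nat) (a : Int) (h : n < l.length) :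
    (l.set n a).take (n + 1) = l.take n ++ [a] := by
  rw [pvTake_succ_of_lt _ _ (by simpa using h), List.take_set_of_le (le_refl n)]
  congr 1
  simp [List.getElem_set_self]

-- ---- A's port equals pvZigS ----

theorem pvInner_eq (b : Bool) (k : Nat) : ∀ (xs : List Int) (i j0 : Nat),
    i < j0 → j0 ≤ xs.length → xs.length - j0 = k →
    (PySem.List.pyRange (j0 : Int) (xs.length : Int) 1).foldl (pvStep b (i : Int)) xs
    = (xs.set i (pvPass b (xs.getD i 0) (xs.drop j0)).1).take j0
      ++ (pvPass b (xs.getD i 0) (xs.drop j0)).2 := by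
  induction k with
  | zero =>
    intro xs i j0 hij hj hk
    have hlen : j0 = xs.length := by omega
    have hi : i < xs.length := by omega
    rw [PySem.List.pyRange_one_eq_nil (by exact_mod_cast hlen.ge)]
    rw [List.drop_eq_nil_of_le hlen.ge]
    simp only [pvPass, List.foldl_nil, List.append_nil]
    rw [List.getD_eq_getElem _ _ hi, List.set_getElem_self, hlen, List.take_length]
  | succ k ih =>
    intro xs i j0 hij hj hk
    have hjl : j0 < xs.length := by omega
    have hi : i < xs.length := by omega
    have hij' : i ≠ j0 := by omega
    rw [PySem.List.pyRange_one_cons (by exact_mod_cast hjl), List.foldl_cons]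
    rw [List.drop_eq_getElem_cons hjl, List.getD_eq_getElem _ _ hi]
    have hstep : pvStep b (i : Int) xs (j0 : Int)
        = if (if b then xs[i] > xs[j0] else xs[i] < xs[j0]) then
            (xs.set i xs[j0]).set j0 xs[i]
          else xs := by
      simp [pvStep, hi, hjl]
    by_cases hc : (if b then xs[i] > xs[j0] else xs[i] < xs[j0])
    · rw [hstep, if_pos hc]
      have hlen' : ((xs.set i xs[j0]).set j0 xs[i]).length = xs.length := by simp
      have h1 : ((j0 : Int) + 1) = ((j0 + 1 : Nat) : Int) := by push_cast; ring
      have h2 : (xs.length : Int) = ((((xs.set i xs[j0]).set j0 xs[i])).length : Int) := by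
        rw [hlen']
      rw [h1, h2, ih ((xs.set i xs[j0]).set j0 xs[i]) i (j0 + 1) (by omega) (by omega)
        (by rw [hlen']; omega)]
      have hgd : ((xs.set i xs[j0]).set j0 xs[i]).getD i 0 = xs[j0] := by
        rw [List.getD_eq_getElem _ _ (by rw [hlen']; omega)]
        rw [List.getElem_set_ne (Ne.symm hij') (by simp; omega)]
        exact List.getElem_set_self (by simp; omega)
      have hdr : ((xs.set i xs[j0]).set j0 xs[i]).drop (j0 + 1) = xs.drop (j0 + 1) := by
        rw [List.drop_set_of_lt (by omega), List.drop_set_of_lt (by omega)]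
      rw [hgd, hdr]
      simp only [pvPass, if_pos hc]
      have hset : ((xs.set i xs[j0]).set j0 xs[i]).set i
          (pvPass b xs[j0] (xs.drop (j0 + 1))).1
          = ((xs.set i (pvPass b xs[j0] (xs.drop (j0 + 1))).1).set j0 xs[i]) := by
        rw [List.set_comm _ _ hij', List.set_set]
        exact List.set_comm _ _ (Ne.symm hij')
      rw [hset, pvTake_set_succ _ _ _ (by simp; omega)]
      simp [List.append_assoc]
    · rw [hstep, if_neg hc]
      have h1 : ((j0 : Int) + 1) = ((j0 + 1 : Nat) : Int) := by push_cast; ring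
      rw [h1, ih xs i (j0 + 1) (by omega) (by omega) (by omega)]
      rw [List.getD_eq_getElem _ _ hi]
      simp only [pvPass, if_neg hc]
      rw [pvTake_succ_of_lt (xs.set i (pvPass b xs[i] (xs.drop (j0 + 1))).1) j0
        (by simp; omega)]
      rw [List.getElem_set_ne hij' (by simp; omega)]
      simp [List.append_assoc]

theorem pvOuter_eq (n : Nat) (k : Nat) : ∀ (xs : List Int) (i : Nat),
    xs.length = n → i ≤ n → n - i = k →
    (PySem.List.pyRange (i : Int) (n : Int) 1).foldl (fun ys j =>
      if PySem.Int.mod j 2 ≠ 0 then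
        (PySem.List.pyRange (j + 1) (n : Int) 1).foldl (pvStep false j) ys
      else
        (PySem.List.pyRange (j + 1) (n : Int) 1).foldl (pvStep true j) ys) xs
    = xs.take i ++ pvZigS (decide (i % 2 = 0)) (xs.drop i) := by
  induction k with
  | zero =>
    intro xs i hn hi hk
    have hin : i = n := by omega
    subst hin
    rw [PySem.List.pyRange_one_eq_nil (by omega)]
    rw [List.drop_eq_nil_of_le (by omega), pvZigS_nil, ← hn, List.take_length]
    simp
  | succ k ihk =>
    intro xs i hn hi hk
    have hin : i < n := by omega
    have hil : i < xs.length := by omega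
    rw [PySem.List.pyRange_one_cons (by exact_mod_cast hin), List.foldl_cons]
    have hmod : PySem.Int.mod (i : Int) 2 = ((i % 2 : Nat) : Int) := by
      rw [PySem.Int.mod_eq_emod_of_pos (by norm_num)]
      push_cast
      rfl
    have hinner := pvInner_eq (decide (i % 2 = 0)) (xs.length - (i + 1)) xs i (i + 1)
      (by omega) (by omega) rfl
    rw [List.getD_eq_getElem _ _ hil] at hinner
    have hcast : ((i : Int) + 1) = ((i + 1 : Nat) : Int) := by push_cast; ring
    have hbody : (if PySem.Int.mod (i : Int) 2 ≠ 0 then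
        (PySem.List.pyRange ((i : Int) + 1) (n : Int) 1).foldl (pvStep false (i : Int)) xs
      else
        (PySem.List.pyRange ((i : Int) + 1) (n : Int) 1).foldl (pvStep true (i : Int)) xs)
        = (xs.set i (pvPass (decide (i % 2 = 0)) xs[i] (xs.drop (i + 1))).1).take (i + 1)
          ++ (pvPass (decide (i % 2 = 0)) xs[i] (xs.drop (i + 1))).2 := by
      by_cases hpar : i % 2 = 0
      · have hb : (decide (i % 2 = 0)) = true := by simp [hpar]
        rw [hb] at hinner ⊢
        rw [if_neg (by rw [hmod]; simp [hpar]), hcast, ← hn]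
        exact hinner
      · have hb : (decide (i % 2 = 0)) = false := by simp [hpar]
        rw [hb] at hinner ⊢
        rw [if_pos (by rw [hmod]; exact_mod_cast hpar), hcast, ← hn]
        exact hinner
    rw [hbody]
    have htk : ((xs.set i (pvPass (decide (i % 2 = 0)) xs[i] (xs.drop (i + 1))).1).take
        (i + 1)).length = i + 1 := by simp; omega
    have hylen : ((xs.set i (pvPass (decide (i % 2 = 0)) xs[i] (xs.drop (i + 1))).1).take
        (i + 1) ++ (pvPass (decide (i % 2 = 0)) xs[i] (xs.drop (i + 1))).2).length = n := by
      have hpl := pvPass_length (decide (i % 2 = 0)) xs[i] (xs.drop (i + 1))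
      simp only [List.length_append, htk, hpl, List.length_drop]
      omega
    rw [hcast, ihk _ (i + 1) hylen (by omega) (by omega)]
    rw [List.take_left' htk, List.drop_left' htk]
    rw [pvTake_set_succ _ _ _ hil]
    have hzig : pvZigS (decide (i % 2 = 0)) (xs.drop i)
        = (pvPass (decide (i % 2 = 0)) xs[i] (xs.drop (i + 1))).1
          :: pvZigS (!(decide (i % 2 = 0)))
            (pvPass (decide (i % 2 = 0)) xs[i] (xs.drop (i + 1))).2 := by
      rw [List.drop_eq_getElem_cons hil, pvZigS_cons]
    have hpar2 : (decide ((i + 1) % 2 = 0)) = !(decide (i % 2 = 0)) := by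
      by_cases hpar : i % 2 = 0
      · have h2 : (i + 1) % 2 = 1 := by omega
        simp [h2, hpar]
      · have h2 : (i + 1) % 2 = 0 := by omega
        simp [h2, hpar]
    rw [hpar2, hzig]
    simp [List.append_assoc]

-- ---- pvZigS is invariant under permutation ----

theorem pvPass_true_cons (c y : Int) (ys : List Int) :
    pvPass true c (y :: ys) =
      if c > y then ((pvPass true y ys).1, c :: (pvPass true y ys).2)
      else ((pvPass true c ys).1, y :: (pvPass true c ys).2) := by
  simp [pvPass]

theorem pvPass_false_cons (c y : Int) (ys : List Int) :
    pvPass false c (y :: ys) =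
      if c < y then ((pvPass false y ys).1, c :: (pvPass false y ys).2)
      else ((pvPass false c ys).1, y :: (pvPass false c ys).2) := by
  simp [pvPass]

theorem pvPass_mem (b : Bool) (c : Int) (l : List Int) :
    (pvPass b c l).1 ∈ c :: l :=
  (pvPass_perm b c l).mem_iff.mpr List.mem_cons_self

theorem pvPass_min_le (l : List Int) : ∀ (c : Int), ∀ z ∈ c :: l, (pvPass true c l).1 ≤ z := by
  induction l with
  | nil => intro c z hz; simp at hz; simp [pvPass, hz]
  | cons y ys ih =>
    intro c z hz
    by_cases hc : c > y
    · rw [pvPass_true_cons, if_pos hc]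
      rcases List.mem_cons.mp hz with h | h
      · subst h
        exact le_trans (ih y y (by simp)) (le_of_lt hc)
      · exact ih y z h
    · rw [pvPass_true_cons, if_neg hc]
      rcases List.mem_cons.mp hz with h | h
      · subst h; exact ih z z (by simp)
      · rcases List.mem_cons.mp h with h' | h'
        · subst h'
          exact le_trans (ih c c (by simp)) (by omega)
        · exact ih c z (by simp [h'])

theorem pvPass_max_ge (l : List Int) : ∀ (c : Int), ∀ z ∈ c :: l, z ≤ (pvPass false c l).1 := by
  induction l with
  | nil => intro c z hz; simp at hz; simp [pvPass, hz]
  | cons y ys ih =>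
    intro c z hz
    by_cases hc : c < y
    · rw [pvPass_false_cons, if_pos hc]
      rcases List.mem_cons.mp hz with h | h
      · subst h
        exact le_trans (le_of_lt hc) (ih y y (by simp))
      · exact ih y z h
    · rw [pvPass_false_cons, if_neg hc]
      rcases List.mem_cons.mp hz with h | h
      · subst h; exact ih z z (by simp)
      · rcases List.mem_cons.mp h with h' | h'
        · subst h'
          exact le_trans (by omega) (ih c c (by simp))
        · exact ih c z (by simp [h'])

theorem pvZigS_perm (n : Nat) : ∀ (b : Bool) (xs ys : List Int),
    xs.length = n → xs.Perm ys → pvZigS b xs = pvZigS b ys := by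
  induction n with
  | zero =>
    intro b xs ys hn h
    cases xs with
    | nil =>
      have hys : ys = [] := h.symm.eq_nil
      subst hys
      rfl
    | cons x r => simp at hn
  | succ n ih =>
    intro b xs ys hn h
    cases xs with
    | nil => simp at hn
    | cons x r =>
      cases ys with
      | nil => exact absurd h.length_eq (by simp)
      | cons y t =>
        have m1' : (pvPass b x r).1 ∈ y :: t := h.subset (pvPass_mem b x r)
        have m2' : (pvPass b y t).1 ∈ x :: r := h.symm.subset (pvPass_mem b y t)
        have hm : (pvPass b x r).1 = (pvPass b y t).1 := by
          cases b with
          | true => exact le_antisymm (pvPass_min_le r x _ m2') (pvPass_min_le t y _ m1')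
          | false => exact le_antisymm (pvPass_max_ge t y _ m1') (pvPass_max_ge r x _ m2')
        have hperm2 : (pvPass b x r).2.Perm (pvPass b y t).2 := by
          have p1 := (pvPass_perm b x r).symm.trans (h.trans (pvPass_perm b y t))
          rw [hm] at p1
          exact p1.cons_inv
        rw [pvZigS_cons, pvZigS_cons, hm]
        congr 1
        exact ih (!b) _ _ (by rw [pvPass_length]; simp at hn; omega) hperm2

-- ---- pvZigS on a sorted list is the two-pointer order ----

theorem pvPass_min_sorted (x : Int) (r : List Int) (hall : ∀ y ∈ r, x ≤ y) :
    pvPass true x r = (x, r) := by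
  induction r with
  | nil => simp [pvPass]
  | cons y ys ih =>
    have hxy : x ≤ y := hall y List.mem_cons_self
    rw [pvPass_true_cons, if_neg (by omega)]
    rw [ih (fun z hz => hall z (List.mem_cons.mpr (Or.inr hz)))]

theorem pvPass_max_sorted (x : Int) (r : List Int) (hall : ∀ z ∈ r, x ≤ z)
    (hr : r.Pairwise (· ≤ ·)) :
    pvPass false x r = ((x :: r).getLast (List.cons_ne_nil x r), (x :: r).dropLast) := by
  induction r generalizing x with
  | nil => simp [pvPass]
  | cons y ys ih =>
    have hxy : x ≤ y := hall y List.mem_cons_self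
    rcases List.pairwise_cons.mp hr with ⟨hyall, hys⟩
    by_cases hc : x < y
    · rw [pvPass_false_cons, if_pos hc, ih y hyall hys]
      simp [List.getLast_cons, List.dropLast_cons₂]
    · have hyx : y = x := by omega
      subst hyx
      rw [pvPass_false_cons, if_neg hc, ih y hyall hys]
      cases ys with
      | nil => simp
      | cons z zs => simp [List.getLast_cons, List.dropLast_cons₂]

theorem pvZigS_sorted (n : Nat) : ∀ (l : List Int), l.length ≤ n →
    l.Pairwise (· ≤ ·) → ∀ b, pvZigS b l = pvZZ b l := by
  induction n with
  | zero =>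
    intro l hl _ b
    cases l with
    | nil => rw [pvZigS_nil, pvZZ_nil]
    | cons x r => simp at hl
  | succ n ih =>
    intro l hl hp b
    cases l with
    | nil => rw [pvZigS_nil, pvZZ_nil]
    | cons x r =>
      rcases List.pairwise_cons.mp hp with ⟨hall, hr⟩
      cases b with
      | true =>
        rw [pvZigS_cons, pvPass_min_sorted x r hall, pvZZ_true_cons]
        simp only [Bool.not_true]
        rw [ih r (by simp at hl; omega) hr false]
      | false =>
        rw [pvZigS_cons, pvPass_max_sorted x r hall hr, pvZZ_false_cons]
        simp only [Bool.not_false]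
        congr 1
        rw [ih (x :: r).dropLast (by simp at hl ⊢; omega)
          (List.Pairwise.sublist (List.dropLast_sublist _) hp) true]

-- ---- B's port, in terms of pvZZ ----

theorem pvZZ_false_concat (l : List Int) (e : Int) :
    pvZZ false (l ++ [e]) = e :: pvZZ true l := by
  cases l with
  | nil => simp [pvZZ]
  | cons x xs =>
    rw [List.cons_append, pvZZ_false_cons]
    congr 1
    · have h1 : (x :: (xs ++ [e])).getLast? = some e := by
        rw [← List.cons_append]
        exact List.getLast?_concat
      have h2 : (x :: (xs ++ [e])).getLast? =
          some ((x :: (xs ++ [e])).getLast (by simp)) :=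
        List.getLast?_eq_some_getLast (by simp)
      rw [h2] at h1
      exact Option.some_inj.mp h1
    · rw [← List.cons_append, List.dropLast_concat]

theorem pvFillAux_stop (s : List Int) (f : Nat) (lo hi : Int) (out : List Int)
    (h : hi < lo) : pvFillAux s f lo hi out = out := by
  cases f <;> simp [pvFillAux, not_le.mpr h]

theorem pvFillAux_eq (s : List Int) (f : Nat) : ∀ (lo hi : Int) (out : List Int),
    0 ≤ lo → hi < (s.length : Int) → (hi + 1 - lo).toNat ≤ f →
    pvFillAux s f lo hi out = out ++ pvZZ true ((s.take (hi + 1).toNat).drop lo.toNat) := by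
  induction f with
  | zero =>
    intro lo hi out h0 hh hf
    have hnil : (s.take (hi + 1).toNat).drop lo.toNat = [] := by
      apply List.drop_eq_nil_of_le
      simp only [List.length_take]
      omega
    rw [hnil, pvZZ_nil, List.append_nil]
    rfl
  | succ f ih =>
    intro lo hi out h0 hh hf
    by_cases hlh : lo ≤ hi
    · have hhi0 : 0 ≤ hi := by omega
      have hlt : lo.toNat < s.length := by omega
      have hht : hi.toNat < s.length := by omega
      have hget : PySem.List.pyGetD s lo 0 = s[lo.toNat] :=
        PySem.List.pyGetD_eq_getElem _ _ (by omega) (by omega)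
      have hcons : (s.take (hi + 1).toNat).drop lo.toNat
          = s[lo.toNat]'hlt :: (s.take (hi + 1).toNat).drop (lo.toNat + 1) := by
        rw [List.drop_eq_getElem_cons (by simp only [List.length_take]; omega)]
        congr 1
        exact List.getElem_take
      simp only [pvFillAux, if_pos hlh]
      by_cases h2 : lo + 1 ≤ hi
      · rw [if_pos h2]
        have hget2 : PySem.List.pyGetD s hi 0 = s[hi.toNat] :=
          PySem.List.pyGetD_eq_getElem _ _ (by omega) (by omega)
        rw [ih (lo + 1) (hi - 1) _ (by omega) (by omega) (by omega)]
        have e1 : (hi - 1 + 1).toNat = hi.toNat := by omega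
        have e2 : (lo + 1).toNat = lo.toNat + 1 := by omega
        have e3 : (hi + 1).toNat = hi.toNat + 1 := by omega
        rw [e1, e2]
        have hsplit : s.take (hi.toNat + 1) = s.take hi.toNat ++ [s[hi.toNat]] :=
          pvTake_succ_of_lt s hi.toNat hht
        have hsub2 : (s.take (hi + 1).toNat).drop (lo.toNat + 1)
            = ((s.take hi.toNat).drop (lo.toNat + 1)) ++ [s[hi.toNat]] := by
          rw [e3, hsplit]
          rw [List.drop_append_of_le_length (by simp only [List.length_take]; omega)]
        rw [hcons, pvZZ_true_cons, hsub2, pvZZ_false_concat, hget, hget2]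
        simp
      · rw [if_neg h2]
        have hle : lo = hi := by omega
        rw [pvFillAux_stop s f _ _ _ (by omega)]
        have hnil2 : (s.take (hi + 1).toNat).drop (lo.toNat + 1) = [] := by
          apply List.drop_eq_nil_of_le
          simp only [List.length_take]
          omega
        rw [hcons, pvZZ_true_cons, hnil2, pvZZ_nil, hget]
    · have hnil : (s.take (hi + 1).toNat).drop lo.toNat = [] := by
        apply List.drop_eq_nil_of_le
        simp only [List.length_take]
        omega
      simp only [pvFillAux, if_neg hlh]
      rw [hnil, pvZZ_nil, List.append_nil]

theorem pvMain (list : List Int) : rearrange_list list = rearrange_list_alt list := by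
  have hA := pvOuter_eq list.length list.length list 0 rfl (by omega) (by omega)
  simp only [Nat.cast_zero, List.take_zero, List.drop_zero, List.nil_append,
    Nat.zero_mod, decide_true] at hA
  have hA' : rearrange_list list = pvZigS true list := by
    simp only [rearrange_list]
    exact hA
  have hB : rearrange_list_alt list
      = pvZZ true (PySem.List.sorted list (fun x => x) false) := by
    simp only [rearrange_list_alt, pvFill]
    rw [pvFillAux_eq (PySem.List.sorted list (fun x => x) false) _ 0
      (((PySem.List.sorted list (fun x => x) false).length : Int) - 1) [] (by omega)
      (by omega) (le_refl _)]
    have e1 : (((PySem.List.sorted list (fun x => x) false).length : Int) - 1 + 1).toNat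
        = (PySem.List.sorted list (fun x => x) false).length := by omega
    rw [e1, List.take_length]
    simp
  have hperm : pvZigS true list = pvZigS true (PySem.List.sorted list (fun x => x) false) :=
    pvZigS_perm list.length true list _ rfl
      (PySem.List.sorted_perm list (fun x => x) false).symm
  have hsorted : pvZigS true (PySem.List.sorted list (fun x => x) false)
      = pvZZ true (PySem.List.sorted list (fun x => x) false) := by
    apply pvZigS_sorted (PySem.List.sorted list (fun x => x) false).length _ (le_refl _)
    have hpw := PySem.List.sorted_pairwise (xs := list) (key := fun x => x)
    simpa using hpw
  rw [hA', hperm, hsorted, hB]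

-- ===== VERDICT (by name: the statement is the Claim_ definition above) =====
theorem rearrange_list_spec : Claim_equal_rearrange_list := by
  intro list _ _
  unfold Spec_rearrange_list
  exact pvMain list
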